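-- pv_equiv track=rewrite | github.com/Martin-Seysen/mmgroup | src/mmgroup/tests/test_gen_xi/reduce.py | xi_dodecad_to_octad
-- ===== SOURCE A (Python) =====
-- def xi_dodecad_to_octad(v):
--     ok = 0; scalar = 0;
--     for i in range(0, 24, 4):
--         w = (v >> i) & 15
--         good = (0x8001 >> i) & 1
--         ok |= good
--         scalar ^= w & -good
--     scalar = (0x6996 >> scalar) & 1
--     return  (2 - scalar) | (ok - 1)
-- ===== SOURCE B (Python) =====
-- # B: closed form — only bit 0 of 0x8001 survives A's loop, so the result depends
-- # only on v & 15; precomputed 16-entry table of 2 - parity(low nibble).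
-- _TAB = [2, 1, 1, 2, 1, 2, 2, 1, 1, 2, 2, 1, 2, 1, 1, 2]
--
-- def xi_dodecad_to_octad(v):
--     return _TAB[v % 16]
-- ===== Notes on version B (the rewrite author's own statement) =====
-- stated objective: simpler
-- what changed: Replaced the 6-iteration nibble loop and the inline 0x6996 parity trick by a one-line 16-entry table lookup on v % 16, since only the i=0 iteration of A's loop contributes (0x8001 has no set bit at any other sampled position), so the result is 2 minus the parity of the low nibble.
import Mathlib
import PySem

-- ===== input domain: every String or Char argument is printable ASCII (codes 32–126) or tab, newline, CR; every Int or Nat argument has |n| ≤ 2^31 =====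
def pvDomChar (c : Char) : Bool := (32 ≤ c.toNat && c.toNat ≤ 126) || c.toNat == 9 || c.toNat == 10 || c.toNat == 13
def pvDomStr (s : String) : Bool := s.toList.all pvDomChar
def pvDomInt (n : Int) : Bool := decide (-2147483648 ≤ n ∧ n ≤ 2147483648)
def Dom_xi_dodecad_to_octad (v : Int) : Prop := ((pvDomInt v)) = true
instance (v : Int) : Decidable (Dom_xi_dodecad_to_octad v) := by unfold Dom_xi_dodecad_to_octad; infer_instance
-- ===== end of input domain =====

-- B replaces A's 6-iteration bit loop by a single 16-entry table lookup on v % 16 (simpler).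

-- ===== PORT A =====
-- the loop 'for i in range(0, 24, 4)' over state (ok, scalar); every shift amount is
-- nonnegative in Python (i ∈ {0,4,…,20}; scalar is a xor of nonnegative nibbles), so
-- .toNat on them is exact.
def xi_dodecad_to_octad (v : Int) : Int :=
  let st := (PySem.List.pyRange 0 24 4).foldl (fun (s : Int × Int) i =>
      let w := PySem.Int.band (v >>> i.toNat) 15
      let good := PySem.Int.band ((0x8001 : Int) >>> i.toNat) 1
      (PySem.Int.bor s.1 good, PySem.Int.bxor s.2 (PySem.Int.band w (-good))))
    ((0 : Int), (0 : Int))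
  let scalar := PySem.Int.band ((0x6996 : Int) >>> st.2.toNat) 1
  PySem.Int.bor (2 - scalar) (st.1 - 1)

-- ===== PORT B =====
-- _TAB[v % 16]: v % 16 is always in 0..15, so the Python indexing never raises and
-- the .getD 0 default is unreachable.
def pvTab_xi_dodecad_to_octad : List Int := [2, 1, 1, 2, 1, 2, 2, 1, 1, 2, 2, 1, 2, 1, 1, 2]

def xi_dodecad_to_octad_alt (v : Int) : Int :=
  (PySem.List.pyGet? pvTab_xi_dodecad_to_octad (PySem.Int.mod v 16)).getD 0

-- ===== PRECONDITION & SPEC =====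
def Spec_xi_dodecad_to_octad (v : Int) (out : Int) : Prop := out = xi_dodecad_to_octad_alt v
instance (v : Int) (out : Int) : Decidable (Spec_xi_dodecad_to_octad v out) := by unfold Spec_xi_dodecad_to_octad; infer_instance

-- ===== CLAIM (what is proved, stated in full; the proofs are below) =====
def Claim_equal_xi_dodecad_to_octad : Prop := ∀ (v : Int), Dom_xi_dodecad_to_octad v → Spec_xi_dodecad_to_octad v (xi_dodecad_to_octad v)

-- ===== LEMMAS AND PROOFS =====

-- masking with 15 is reduction mod 16, also for negative v
theorem pv_band15_eq_emod (v : Int) : PySem.Int.band v 15 = v % 16 := by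
  unfold PySem.Int.band
  split_ifs with h h' h'
  · rw [show Int.toNat 15 = 2 ^ 4 - 1 from rfl, Nat.and_two_pow_sub_one_eq_mod]
    omega
  · omega
  · rw [show Int.toNat 15 = 2 ^ 4 - 1 from rfl, Nat.and_comm, Nat.and_two_pow_sub_one_eq_mod]
    omega
  · omega

-- only the i = 0 iteration of A's loop contributes: ok ends at 1 and scalar at v & 15
theorem pv_A_closed (v : Int) :
    xi_dodecad_to_octad v =
      2 - PySem.Int.band ((0x6996 : Int) >>> (PySem.Int.band v 15).toNat) 1 := by
  simp only [xi_dodecad_to_octad]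
  rw [show PySem.List.pyRange 0 24 4 = [0, 4, 8, 12, 16, 20] from by decide]
  simp only [List.foldl]
  norm_num
  rw [show (PySem.Int.band ((32769 : Int) >>> (0 : Int)) 1) = 1 from by decide,
      show (PySem.Int.band ((32769 : Int) >>> (4 : Int)) 1) = 0 from by decide,
      show (PySem.Int.band ((32769 : Int) >>> (8 : Int)) 1) = 0 from by decide,
      show (PySem.Int.band ((32769 : Int) >>> (12 : Int)) 1) = 0 from by decide,
      show (PySem.Int.band ((32769 : Int) >>> (16 : Int)) 1) = 0 from by decide,
      show (PySem.Int.band ((32769 : Int) >>> (20 : Int)) 1) = 0 from by decide]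
  simp only [neg_zero, PySem.Int.band_zero, PySem.Int.bxor_zero, PySem.Int.bor_zero,
    PySem.Int.band_neg_one]
  rw [show (v >>> (0 : Int)) = v from by rcases v with m | m <;> rfl,
      show (PySem.Int.bxor 0 (PySem.Int.band v 15)) = PySem.Int.band v 15 from by
        rw [PySem.Int.bxor_comm]; exact PySem.Int.bxor_zero _]
  rw [show (PySem.Int.bor 0 1) = 1 from by decide]
  norm_num [PySem.Int.bor_zero]

-- ===== VERDICT (by name: the statement is the Claim_ definition above) =====
theorem xi_dodecad_to_octad_spec : Claim_equal_xi_dodecad_to_octad := by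
  intro v _
  unfold Spec_xi_dodecad_to_octad xi_dodecad_to_octad_alt
  rw [pv_A_closed, pv_band15_eq_emod]
  have hmod : PySem.Int.mod v 16 = v % 16 := by
    simp [PySem.Int.mod, Int.fmod_eq_emod]
  rw [hmod]
  have h0 : 0 ≤ v % 16 := Int.emod_nonneg v (by norm_num)
  have h1 : v % 16 < 16 := Int.emod_lt_of_pos v (by norm_num)
  interval_cases h : (v % 16) <;> decide
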